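-- pv_equiv track=rewrite | github.com/sqamentor/Hybrid_Automation | framework/core/session_manager.py | _detect_auth_type
-- ===== SOURCE A (Python) =====
-- from typing import Any, Dict, List, Optional
--
-- def _detect_auth_type(cookies: List[Dict], tokens: Dict, storage: Dict) -> Optional[str]:
--     """Detect authentication type from extracted data"""
--     # Check for OAuth
--     if any("oauth" in str(k).lower() or "oauth" in str(v).lower() for k, v in tokens.items()):
--         return "OAUTH"
--
--     # Check for JWT
--     if any("jwt" in str(k).lower() or "jwt" in str(v).lower() for k, v in tokens.items()):
--         return "JWT"
--
--     # Check for SSO (Okta, Azure, etc.)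
--     cookie_names = [c["name"].lower() for c in cookies]
--     if any("okta" in name or "azure" in name or "saml" in name for name in cookie_names):
--         return "SSO"
--
--     # Check for basic auth (typically in Authorization header)
--     if any(
--         "authorization" in str(k).lower() or "authorization" in str(v).lower()
--         for k, v in tokens.items()
--     ):
--         return "BASIC"
--
--     return "UNKNOWN"
-- ===== SOURCE B (Python) =====
-- def _detect_auth_type(cookies, tokens, storage):
--     """Detect authentication type from extracted data (single pass over tokens)."""
--     has_oauth = has_jwt = has_basic = False
--     for k, v in tokens.items():
--         kl, vl = str(k).lower(), str(v).lower()
--         has_oauth = has_oauth or "oauth" in kl or "oauth" in vl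
--         has_jwt = has_jwt or "jwt" in kl or "jwt" in vl
--         has_basic = has_basic or "authorization" in kl or "authorization" in vl
--     if has_oauth:
--         return "OAUTH"
--     if has_jwt:
--         return "JWT"
--     if any(t in c["name"].lower() for c in cookies for t in ("okta", "azure", "saml")):
--         return "SSO"
--     if has_basic:
--         return "BASIC"
--     return "UNKNOWN"
-- ===== Notes on version B (the rewrite author's own statement) =====
-- stated objective: alternative
-- what changed: A scans tokens.items() three separate times with any(); B computes the oauth/jwt/authorization flags in one fold over the tokens and checks cookies with a single lazy any() instead of building the intermediate cookie_names list.
import Mathlib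
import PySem

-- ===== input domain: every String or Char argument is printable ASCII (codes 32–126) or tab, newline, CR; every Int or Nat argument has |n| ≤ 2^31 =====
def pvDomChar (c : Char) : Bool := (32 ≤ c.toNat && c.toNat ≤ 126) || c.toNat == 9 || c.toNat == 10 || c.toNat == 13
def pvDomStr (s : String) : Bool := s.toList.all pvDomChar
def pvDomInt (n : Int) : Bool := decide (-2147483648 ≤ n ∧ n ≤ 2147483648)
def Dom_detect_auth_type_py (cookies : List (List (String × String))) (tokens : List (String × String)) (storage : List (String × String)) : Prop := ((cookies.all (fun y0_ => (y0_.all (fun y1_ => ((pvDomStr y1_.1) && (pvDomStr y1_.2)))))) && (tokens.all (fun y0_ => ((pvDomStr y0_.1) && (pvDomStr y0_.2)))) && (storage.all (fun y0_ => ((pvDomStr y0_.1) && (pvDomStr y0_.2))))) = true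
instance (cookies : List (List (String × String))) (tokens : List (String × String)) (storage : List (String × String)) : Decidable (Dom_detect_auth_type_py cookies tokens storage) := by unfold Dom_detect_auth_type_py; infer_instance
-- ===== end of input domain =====

-- B replaces A's three separate any() passes over tokens with one fold computing the three flags,
-- and the intermediate cookie_names list with a single lazy any (objective: alternative decomposition).
-- Equivalence is about the return value; neither program mutates its arguments.

-- "p in kv-key.lower() or p in kv-value.lower()": shared by both ports (each Python spells it inline)
def pvTokenHit (p : String) (kv : String × String) : Bool :=
  PySem.Str.isIn p (PySem.Str.lower kv.1) || PySem.Str.isIn p (PySem.Str.lower kv.2)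

-- c["name"].lower(): Dict lookup; KeyError (missing "name") is excluded by Pre_, the .getD "" default is never reached there
def pvCookieName (c : List (String × String)) : String :=
  PySem.Str.lower (((PySem.Dict.mk c).get? "name").getD "")

-- ===== PORT A =====
def detect_auth_type_py (cookies : List (List (String × String))) (tokens : List (String × String)) (storage : List (String × String)) : Option String :=
  if tokens.any (pvTokenHit "oauth") then some "OAUTH"
  else if tokens.any (pvTokenHit "jwt") then some "JWT"
  else
    let cookie_names := cookies.map pvCookieName
    if cookie_names.any (fun n => PySem.Str.isIn "okta" n || PySem.Str.isIn "azure" n || PySem.Str.isIn "saml" n) then some "SSO"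
    else if tokens.any (pvTokenHit "authorization") then some "BASIC"
    else some "UNKNOWN"

-- ===== PORT B =====
def detect_auth_type_py_alt (cookies : List (List (String × String))) (tokens : List (String × String)) (storage : List (String × String)) : Option String :=
  let flags : Bool × Bool × Bool := tokens.foldl
    (fun st kv =>
      let kl := PySem.Str.lower kv.1
      let vl := PySem.Str.lower kv.2
      (st.1 || PySem.Str.isIn "oauth" kl || PySem.Str.isIn "oauth" vl,
       st.2.1 || PySem.Str.isIn "jwt" kl || PySem.Str.isIn "jwt" vl,
       st.2.2 || PySem.Str.isIn "authorization" kl || PySem.Str.isIn "authorization" vl))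
    (false, false, false)
  if flags.1 then some "OAUTH"
  else if flags.2.1 then some "JWT"
  else if cookies.any (fun c => ["okta", "azure", "saml"].any (fun t => PySem.Str.isIn t (pvCookieName c))) then some "SSO"
  else if flags.2.2 then some "BASIC"
  else some "UNKNOWN"

-- ===== PRECONDITION & SPEC =====
-- Pre_ excludes exactly the inputs where A raises KeyError: some cookie dict has no "name" key
-- while no token key/value contains "oauth" or "jwt" (so the cookie pass is actually reached).
def Pre_detect_auth_type_py (cookies : List (List (String × String))) (tokens : List (String × String)) (storage : List (String × String)) : Prop :=
  (∀ c ∈ cookies, (PySem.Dict.mk c).contains "name" = true) ∨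
  (∃ kv ∈ tokens, pvTokenHit "oauth" kv = true ∨ pvTokenHit "jwt" kv = true)
instance (cookies : List (List (String × String))) (tokens : List (String × String)) (storage : List (String × String)) : Decidable (Pre_detect_auth_type_py cookies tokens storage) := by unfold Pre_detect_auth_type_py; infer_instance

def pvWitness_detect_auth_type_py : (List (List (String × String))) × (List (String × String)) × (List (String × String)) :=
  ([[("name", "okta-sid")]], [("access", "Bearer x")], [])

def Spec_detect_auth_type_py (cookies : List (List (String × String))) (tokens : List (String × String)) (storage : List (String × String)) (out : Option String) : Prop := out = detect_auth_type_py_alt cookies tokens storage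
instance (cookies : List (List (String × String))) (tokens : List (String × String)) (storage : List (String × String)) (out : Option String) : Decidable (Spec_detect_auth_type_py cookies tokens storage out) := by unfold Spec_detect_auth_type_py; infer_instance

-- ===== CLAIM (what is proved, stated in full; the proofs are below) =====
def Claim_equal_detect_auth_type_py : Prop := ∀ (cookies : List (List (String × String))) (tokens : List (String × String)) (storage : List (String × String)), Dom_detect_auth_type_py cookies tokens storage → Pre_detect_auth_type_py cookies tokens storage → Spec_detect_auth_type_py cookies tokens storage (detect_auth_type_py cookies tokens storage)

-- ===== LEMMAS AND PROOFS =====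

-- B's single fold computes exactly the three any-scans A performs
theorem pv_foldl_flags (l : List (String × String)) (o j a : Bool) :
    l.foldl
      (fun st kv =>
        let kl := PySem.Str.lower kv.1
        let vl := PySem.Str.lower kv.2
        (st.1 || PySem.Str.isIn "oauth" kl || PySem.Str.isIn "oauth" vl,
         st.2.1 || PySem.Str.isIn "jwt" kl || PySem.Str.isIn "jwt" vl,
         st.2.2 || PySem.Str.isIn "authorization" kl || PySem.Str.isIn "authorization" vl))
      (o, j, a)
    = (o || l.any (pvTokenHit "oauth"), j || l.any (pvTokenHit "jwt"), a || l.any (pvTokenHit "authorization")) := by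
  induction l generalizing o j a with
  | nil => simp
  | cons kv t ih =>
      simp only [List.foldl_cons, List.any_cons, ih, pvTokenHit]
      refine Prod.ext ?_ (Prod.ext ?_ ?_) <;> simp [Bool.or_assoc]

theorem pv_cookie_any (cookies : List (List (String × String))) :
    (cookies.map pvCookieName).any
        (fun n => PySem.Str.isIn "okta" n || PySem.Str.isIn "azure" n || PySem.Str.isIn "saml" n)
    = cookies.any (fun c => ["okta", "azure", "saml"].any (fun t => PySem.Str.isIn t (pvCookieName c))) := by
  simp only [List.any_map, Function.comp_def, List.any_cons, List.any_nil, Bool.or_assoc, Bool.or_false]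

-- ===== VERDICT (by name: the statement is the Claim_ definition above) =====
theorem detect_auth_type_py_spec : Claim_equal_detect_auth_type_py := by
  intro cookies tokens storage _ _
  unfold Spec_detect_auth_type_py detect_auth_type_py detect_auth_type_py_alt
  rw [pv_foldl_flags]
  simp only [Bool.false_or]
  rw [pv_cookie_any]
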